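-- pv_equiv track=rewrite | github.com/abhijit-sahu-276/PolicyGapAnalysis | src/backend/app.py | _wrap_long_words
-- ===== SOURCE A (Python) =====
-- def _wrap_long_words(text, max_chunk=50):
--     if not text:
--         return ""
--     words = []
--     for w in text.split(" "):
--         if len(w) <= max_chunk:
--             words.append(w)
--             continue
--         parts = [w[i : i + max_chunk] for i in range(0, len(w), max_chunk)]
--         words.extend(parts)
--     return " ".join(words)
-- ===== SOURCE B (Python) =====
-- def _wrap_long_words(text, max_chunk=50):
--     # Single pass over characters: run counts consecutive non-space chars;
--     # insert a break before the (max_chunk+1)-th character of a run.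
--     if not text:
--         return ""
--     out = []
--     run = 0
--     for c in text:
--         if c == " ":
--             out.append(c)
--             run = 0
--         elif run == max_chunk:
--             out.append(" ")
--             out.append(c)
--             run = 1
--         else:
--             out.append(c)
--             run += 1
--     return "".join(out)
-- ===== Notes on version B (the rewrite author's own statement) =====
-- stated objective: alternative
-- what changed: Replaced split-on-space / per-word range-slicing / rejoin with a single character-by-character pass that keeps a run counter of consecutive non-space characters and inserts a space break before the (max_chunk+1)-th character of a run.
-- outside the precondition, e.g. on _wrap_long_words('abc', -1): A returns '', B returns 'abc'
import Mathlib
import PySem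

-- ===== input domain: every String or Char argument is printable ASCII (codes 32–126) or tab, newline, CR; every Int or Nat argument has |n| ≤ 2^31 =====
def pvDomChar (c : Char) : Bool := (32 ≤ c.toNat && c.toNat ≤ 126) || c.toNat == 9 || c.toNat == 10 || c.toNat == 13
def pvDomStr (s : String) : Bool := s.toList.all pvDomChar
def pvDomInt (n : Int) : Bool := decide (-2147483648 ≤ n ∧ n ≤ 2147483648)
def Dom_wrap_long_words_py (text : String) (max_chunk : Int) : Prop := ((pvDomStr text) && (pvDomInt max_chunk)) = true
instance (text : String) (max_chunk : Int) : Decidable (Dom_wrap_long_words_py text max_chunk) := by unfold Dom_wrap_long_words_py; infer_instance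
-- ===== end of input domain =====

-- B replaces A's split-on-space / per-word slicing / rejoin with a single character pass that
-- keeps a run counter of consecutive non-space characters (alternative decomposition, same cost).

-- ===== PORT A =====
def wrap_long_words_py (text : String) (max_chunk : Int) : String :=
  if text = "" then ""
  else
    -- text.split(" "): the separator " " is nonempty, so Str.split? is `some`; getD [] is exact
    let pieces : List String := (PySem.Str.split? text " ").getD []
    let words : List String := pieces.foldl (fun ws w =>
      if PySem.Str.len w ≤ max_chunk then ws ++ [w]
      else ws ++ ((PySem.List.pyRange 0 (PySem.Str.len w) max_chunk).map
                    (fun i => PySem.Str.slice w (some i) (some (i + max_chunk))))) []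
    PySem.Str.join " " words

-- ===== PORT B =====
-- the loop body of B: (out, run) state, one character at a time
def pvStepB (max_chunk : Int) (st : List Char × Int) (c : Char) : List Char × Int :=
  if c = ' ' then (st.1 ++ [c], 0)
  else if st.2 = max_chunk then (st.1 ++ [' ', c], 1)
  else (st.1 ++ [c], st.2 + 1)

def wrap_long_words_py_alt (text : String) (max_chunk : Int) : String :=
  if text = "" then ""
  else
    -- "".join(out) where out is a list of single characters
    String.ofList (text.toList.foldl (pvStepB max_chunk) ([], 0)).1

-- ===== PRECONDITION & SPEC =====
-- Pre_ restricts to the natural domain max_chunk ≥ 1: at max_chunk = 0 A raises ValueError from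
-- range with step zero, and for negative max_chunk A silently drops every word
-- (an artefact of range with a negative step), outside the function's natural domain.
def Pre_wrap_long_words_py (text : String) (max_chunk : Int) : Prop := 1 ≤ max_chunk
instance (text : String) (max_chunk : Int) : Decidable (Pre_wrap_long_words_py text max_chunk) := by unfold Pre_wrap_long_words_py; infer_instance
def pvWitness_wrap_long_words_py : String × Int := ("hello world", 3)

def Spec_wrap_long_words_py (text : String) (max_chunk : Int) (out : String) : Prop := out = wrap_long_words_py_alt text max_chunk
instance (text : String) (max_chunk : Int) (out : String) : Decidable (Spec_wrap_long_words_py text max_chunk out) := by unfold Spec_wrap_long_words_py; infer_instance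

-- ===== CLAIM (what is proved, stated in full; the proofs are below) =====
def Claim_equal_wrap_long_words_py : Prop := ∀ (text : String) (max_chunk : Int), Dom_wrap_long_words_py text max_chunk → Pre_wrap_long_words_py text max_chunk → Spec_wrap_long_words_py text max_chunk (wrap_long_words_py text max_chunk)

-- ===== LEMMAS AND PROOFS =====

def pvSpW : List Char → List (List Char)
  | [] => [[]]
  | c :: rest =>
    if c = ' ' then [] :: pvSpW rest
    else match pvSpW rest with
      | [] => [[c]]
      | w :: ws => (c :: w) :: ws
def pvModHead (f : List Char → List Char) : List (List Char) → List (List Char)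
  | [] => []
  | w :: ws => f w :: ws
lemma pvSpW_ne_nil (cs : List Char) : pvSpW cs ≠ [] := by
  cases cs with
  | nil => simp [pvSpW]
  | cons c rest =>
    simp only [pvSpW]
    split
    · simp
    · rcases h : pvSpW rest with _ | ⟨w, ws⟩ <;> simp
lemma pvGo_spec (fuel : ℕ) : ∀ (l cur : List Char) (acc : List (List Char)),
    l.length ≤ fuel →
    PySem.Chars.splitOn.go [' '] fuel l cur acc
      = acc.reverse ++ pvModHead (cur.reverse ++ ·) (pvSpW l) := by
  induction fuel with
  | zero =>
    intro l cur acc h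
    have hl : l = [] := by cases l <;> simp_all
    subst hl
    simp [PySem.Chars.splitOn.go.eq_def, pvSpW, pvModHead]
  | succ n ih =>
    intro l cur acc h
    cases l with
    | nil => simp [PySem.Chars.splitOn.go.eq_def, pvSpW, pvModHead]
    | cons c rest =>
      rw [PySem.Chars.splitOn.go.eq_def]
      by_cases hc : c = ' '
      · subst hc
        have hp : List.isPrefixOf [' '] (' ' :: rest) = true := by
          simp [List.isPrefixOf]
        simp only [hp, if_pos]
        have hd : List.drop [' '].length (' ' :: rest) = rest := by simp
        rw [hd, ih rest [] (cur.reverse :: acc) (by simpa using h)]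
        have hsp : pvSpW (' ' :: rest) = [] :: pvSpW rest := by simp [pvSpW]
        rw [hsp]
        rcases hr : pvSpW rest with _ | ⟨w, ws⟩
        · exact absurd hr (pvSpW_ne_nil rest)
        · simp [pvModHead]
      · have hp : List.isPrefixOf [' '] (c :: rest) = false := by
          simp [List.isPrefixOf]; exact fun hh => hc hh.symm
        simp only [hp]
        rw [ih rest (c :: cur) acc (by simpa using h)]
        have hsp : pvSpW (c :: rest) = match pvSpW rest with
          | [] => [[c]]
          | w :: ws => (c :: w) :: ws := by simp [pvSpW, hc]
        rw [hsp]
        rcases hr : pvSpW rest with _ | ⟨w, ws⟩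
        · exact absurd hr (pvSpW_ne_nil rest)
        · simp [pvModHead]
lemma pvSplitOn_eq (cs : List Char) : PySem.Chars.splitOn cs [' '] = pvSpW cs := by
  unfold PySem.Chars.splitOn
  rw [pvGo_spec (cs.length + 1) cs [] [] (by omega)]
  rcases h : pvSpW cs with _ | ⟨w, ws⟩
  · exact absurd h (pvSpW_ne_nil cs)
  · simp [pvModHead]
def pvEmit (mc : Int) : Int → List Char → List Char
  | _, [] => []
  | run, c :: rest => if run = mc then ' ' :: c :: pvEmit mc 1 rest else c :: pvEmit mc (run + 1) rest
lemma pvFold_word (mc : Int) (hmc : 1 ≤ mc) :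
    ∀ (w : List Char), ' ' ∉ w → ∀ (acc : List Char) (run : Int), 0 ≤ run → run ≤ mc →
    ∃ run', List.foldl (pvStepB mc) (acc, run) w = (acc ++ pvEmit mc run w, run') := by
  intro w
  induction w with
  | nil => exact fun _ acc run _ _ => ⟨run, by simp [pvEmit]⟩
  | cons c rest ih =>
    intro hw acc run h0 hle
    simp only [List.mem_cons, not_or] at hw
    obtain ⟨hc, hrest⟩ := hw
    have hc' : ¬ (c = ' ') := fun h => hc h.symm
    by_cases hr : run = mc
    · obtain ⟨r', hr'⟩ := ih hrest (acc ++ [' ', c]) 1 (by omega) (by omega)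
      exact ⟨r', by simp [List.foldl_cons, pvStepB, hc', hr, pvEmit, hr']⟩
    · obtain ⟨r', hr'⟩ := ih hrest (acc ++ [c]) (run + 1) (by omega) (by omega)
      exact ⟨r', by simp [List.foldl_cons, pvStepB, hc', hr, pvEmit, hr']⟩
lemma pvEmit_full (mc : Int) (hmc : 1 ≤ mc) (w : List Char) :
    pvEmit mc mc w = if w = [] then [] else ' ' :: pvEmit mc 0 w := by
  cases w with
  | nil => simp [pvEmit]
  | cons c rest =>
    have h0 : ¬ ((0 : Int) = mc) := by omega
    simp [pvEmit, h0]
lemma pvEmit_take (mc : Int) :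
    ∀ (w : List Char) (run : Int), 0 ≤ run → run < mc →
    pvEmit mc run w = w.take (mc - run).toNat ++ pvEmit mc mc (w.drop (mc - run).toNat) := by
  intro w
  induction w with
  | nil => intro run _ _; simp [pvEmit]
  | cons c rest ih =>
    intro run h0 hlt
    have hr : ¬ (run = mc) := by omega
    have hk : (mc - run).toNat = (mc - (run + 1)).toNat + 1 := by omega
    rw [hk]
    simp only [pvEmit, hr, List.take_succ_cons, List.drop_succ_cons, List.cons_append]
    by_cases h2 : run + 1 = mc
    · have : (mc - (run + 1)).toNat = 0 := by omega
      rw [this]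
      simp [h2]
    · rw [ih (run + 1) (by omega) (by omega)]
      simp
def pvChunks (m : ℕ) : List Char → List (List Char)
  | [] => []
  | c :: rest => ((c :: rest).take (m+1)) :: pvChunks m ((c :: rest).drop (m+1))
termination_by w => w.length
decreasing_by simp
def pvGL (m : ℕ) (w : List Char) : List (List Char) :=
  if (w.length : Int) ≤ (m : Int) + 1 then [w] else pvChunks m w
lemma pvJoin_cons (w : List Char) (ws : List (List Char)) :
    PySem.Chars.join [' '] (w :: ws)
      = w ++ (if ws = [] then [] else ' ' :: PySem.Chars.join [' '] ws) := by
  cases ws with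
  | nil => simp [PySem.Chars.join_singleton]
  | cons q rest => simp [PySem.Chars.join_cons_cons]
lemma pvChunks_ne_nil (m : ℕ) (w : List Char) (hw : w ≠ []) : pvChunks m w ≠ [] := by
  cases w with
  | nil => exact absurd rfl hw
  | cons c rest => simp [pvChunks]
lemma pvEmit_zero_chunks (m : ℕ) :
    ∀ (n : ℕ) (w : List Char), w.length ≤ n → w ≠ [] →
    pvEmit ((m : Int) + 1) 0 w = PySem.Chars.join [' '] (pvChunks m w) := by
  intro n
  induction n with
  | zero =>
    intro w h hne
    cases w with
    | nil => exact absurd rfl hne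
    | cons c rest => simp at h
  | succ n ih =>
    intro w h hne
    have hmc : (1 : Int) ≤ (m : Int) + 1 := by omega
    rw [pvEmit_take _ w 0 le_rfl (by omega), pvEmit_full _ hmc]
    have hk : (((m : Int) + 1) - 0).toNat = m + 1 := by omega
    rw [hk]
    cases w with
    | nil => exact absurd rfl hne
    | cons c rest =>
      rw [show pvChunks m (c :: rest)
            = ((c :: rest).take (m+1)) :: pvChunks m ((c :: rest).drop (m+1)) from by
          rw [pvChunks]]
      rw [pvJoin_cons]
      by_cases hd : (c :: rest).drop (m+1) = []
      · rw [hd]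
        simp [pvChunks]
      · rw [if_neg hd, if_neg (pvChunks_ne_nil m _ hd)]
        rw [ih _ (by simp at h ⊢; omega) hd]
lemma pvEmit_GL (m : ℕ) (w : List Char) :
    pvEmit ((m : Int) + 1) 0 w = PySem.Chars.join [' '] (pvGL m w) := by
  by_cases hne : w = []
  · subst hne
    simp only [pvEmit, pvGL]
    rw [if_pos (by simp only [List.length_nil, Nat.cast_zero]; omega), PySem.Chars.join_singleton]
  · unfold pvGL
    by_cases hlen : (w.length : Int) ≤ (m : Int) + 1
    · rw [if_pos hlen]
      have hmc : (1 : Int) ≤ (m : Int) + 1 := by omega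
      rw [pvEmit_take _ w 0 le_rfl (by omega)]
      have hk : (((m : Int) + 1) - 0).toNat = m + 1 := by omega
      have hdrop : w.drop (m+1) = [] := by
        apply List.drop_eq_nil_of_le
        omega
      rw [hk, hdrop]
      have htake : w.take (m+1) = w := by
        apply List.take_of_length_le
        omega
      simp [htake, pvEmit, PySem.Chars.join_singleton]
    · rw [if_neg hlen]
      exact pvEmit_zero_chunks m w.length w le_rfl hne
lemma pvJoin_append (xs ys : List (List Char)) (hx : xs ≠ []) (hy : ys ≠ []) :
    PySem.Chars.join [' '] (xs ++ ys)
      = PySem.Chars.join [' '] xs ++ ' ' :: PySem.Chars.join [' '] ys := by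
  induction xs with
  | nil => exact absurd rfl hx
  | cons w ws ih =>
    cases ws with
    | nil =>
      rw [List.singleton_append, pvJoin_cons, PySem.Chars.join_singleton]
      simp [hy]
    | cons w' ws' =>
      rw [List.cons_append, pvJoin_cons, pvJoin_cons w (w' :: ws'), ih (by simp)]
      simp
lemma pvGL_ne_nil (m : ℕ) (w : List Char) : pvGL m w ≠ [] := by
  unfold pvGL
  split
  · simp
  · rename_i h
    apply pvChunks_ne_nil
    intro hw
    subst hw
    simp at h
    omega
lemma pvJoin_spW (cs : List Char) : PySem.Chars.join [' '] (pvSpW cs) = cs := by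
  induction cs with
  | nil => simp [pvSpW, PySem.Chars.join_singleton]
  | cons c rest ih =>
    simp only [pvSpW]
    split
    · rename_i hc
      subst hc
      rw [pvJoin_cons]
      simp [pvSpW_ne_nil, ih]
    · rcases h : pvSpW rest with _ | ⟨w, ws⟩
      · exact absurd h (pvSpW_ne_nil rest)
      · rw [h] at ih
        rw [pvJoin_cons] at ih ⊢
        simp only [List.cons_append, ih]
lemma pvSpW_nospace (cs : List Char) : ∀ w ∈ pvSpW cs, ' ' ∉ w := by
  induction cs with
  | nil => simp [pvSpW]
  | cons c rest ih =>
    simp only [pvSpW]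
    split
    · intro w hw
      rcases List.mem_cons.mp hw with hw | hw
      · simp [hw]
      · exact ih w hw
    · rename_i hc
      rcases h : pvSpW rest with _ | ⟨w0, ws0⟩
      · intro w hw
        rcases List.mem_cons.mp hw with hw | hw
        · simp [hw, hc, eq_comm]
        · simp at hw
      · intro w hw
        rcases List.mem_cons.mp hw with hw | hw
        · subst hw
          intro hmem
          rcases List.mem_cons.mp hmem with hmem | hmem
          · exact hc hmem.symm
          · exact ih w0 (by rw [h]; exact List.mem_cons_self) hmem
        · exact ih w (by rw [h]; exact List.mem_cons_of_mem _ hw)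
lemma pvFold_words (m : ℕ) :
    ∀ (ws : List (List Char)), ws ≠ [] → (∀ w ∈ ws, ' ' ∉ w) → ∀ (acc : List Char),
    ∃ r, List.foldl (pvStepB ((m : Int) + 1)) (acc, 0) (PySem.Chars.join [' '] ws)
          = (acc ++ PySem.Chars.join [' '] (ws.flatMap (pvGL m)), r) := by
  intro ws
  induction ws with
  | nil => exact fun h => absurd rfl h
  | cons w rest ih =>
    intro _ hns acc
    have hmc : (1 : Int) ≤ (m : Int) + 1 := by omega
    have hw : ' ' ∉ w := hns w List.mem_cons_self
    cases rest with
    | nil =>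
      rw [PySem.Chars.join_singleton]
      obtain ⟨r, hr⟩ := pvFold_word _ hmc w hw acc 0 le_rfl (by omega)
      refine ⟨r, ?_⟩
      rw [hr, pvEmit_GL]
      simp
    | cons w' rest' =>
      rw [pvJoin_cons, if_neg (by simp)]
      rw [show w ++ ' ' :: PySem.Chars.join [' '] (w' :: rest')
            = (w ++ [' ']) ++ PySem.Chars.join [' '] (w' :: rest') from by simp]
      rw [List.foldl_append, List.foldl_append]
      obtain ⟨r1, hr1⟩ := pvFold_word _ hmc w hw acc 0 le_rfl (by omega)
      rw [hr1]
      have hsp : List.foldl (pvStepB ((m : Int) + 1)) (acc ++ pvEmit ((m : Int) + 1) 0 w, r1) [' ']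
          = (acc ++ pvEmit ((m : Int) + 1) 0 w ++ [' '], 0) := by
        simp [pvStepB]
      rw [hsp]
      obtain ⟨r2, hr2⟩ := ih (by simp) (fun x hx => hns x (List.mem_cons_of_mem _ hx))
        (acc ++ pvEmit ((m : Int) + 1) 0 w ++ [' '])
      rw [hr2]
      refine ⟨r2, ?_⟩
      have hflat : (w :: w' :: rest').flatMap (pvGL m) = pvGL m w ++ (w' :: rest').flatMap (pvGL m) := by
        simp [List.flatMap_cons]
      rw [hflat, pvJoin_append _ _ (pvGL_ne_nil m w)
        (by
          have := pvGL_ne_nil m w'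
          simp only [List.flatMap_cons]
          exact fun hh => this (List.append_eq_nil_iff.mp hh).1)]
      rw [pvEmit_GL]
      simp
lemma pvPyRange_pos_cons (a b s : Int) (hs : 0 < s) (hab : a < b) :
    PySem.List.pyRange a b s = a :: PySem.List.pyRange (a + s) b s := by
  rw [PySem.List.pyRange_of_pos _ _ hs, PySem.List.pyRange_of_pos _ _ hs]
  have hq1 : 1 ≤ (b - a + s - 1) / s := by
    rw [Int.le_ediv_iff_mul_le hs]
    omega
  have hconv : b - (a + s) + s - 1 = (b - a + s - 1) + (-1) * s := by ring
  by_cases h2 : a + s < b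
  · rw [if_pos hab, if_pos h2, hconv, Int.add_mul_ediv_right _ _ (by omega)]
    have hn : ((b - a + s - 1) / s).toNat = (((b - a + s - 1) / s + -1).toNat) + 1 := by omega
    rw [hn, List.range_succ_eq_map]
    simp only [List.map_cons, List.map_map]
    congr 1
    · simp
    · apply List.map_congr_left
      intro k _
      simp [Function.comp]
      ring
  · rw [if_pos hab, if_neg h2]
    have hq2 : (b - a + s - 1) / s < 2 := by
      rw [Int.ediv_lt_iff_lt_mul hs]
      omega
    have : ((b - a + s - 1) / s).toNat = 1 := by omega
    rw [this]
    simp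
lemma pvPyRange_shift (b s : Int) (hs : 0 < s) :
    PySem.List.pyRange s b s = (PySem.List.pyRange 0 (b - s) s).map (· + s) := by
  rw [PySem.List.pyRange_of_pos _ _ hs, PySem.List.pyRange_of_pos _ _ hs]
  rw [List.map_map]
  have hiff : s < b ↔ 0 < b - s := by omega
  have harg : b - s - 0 + s - 1 = b - s + s - 1 := by ring
  rw [if_congr hiff rfl rfl, harg]
  apply List.map_congr_left
  intro k _
  simp
  ring
lemma pvPyRange_chunks (m : ℕ) :
    ∀ (n : ℕ) (w : List Char), w.length ≤ n →
    (PySem.List.pyRange 0 (w.length : Int) ((m : Int) + 1)).map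
        (fun i => PySem.List.slice w (some i) (some (i + ((m : Int) + 1))))
      = pvChunks m w := by
  intro n
  have hs : (0 : Int) < (m : Int) + 1 := by omega
  induction n with
  | zero =>
    intro w h
    have hw : w = [] := by cases w <;> simp_all
    subst hw
    rw [PySem.List.pyRange_of_pos _ _ hs]
    simp [pvChunks]
  | succ n ih =>
    intro w h
    cases w with
    | nil =>
      rw [PySem.List.pyRange_of_pos _ _ hs]
      simp [pvChunks]
    | cons c rest =>
      have hL : (0 : Int) < (((c :: rest).length : ℕ) : Int) := by simp
      rw [pvPyRange_pos_cons _ _ _ hs hL, List.map_cons, zero_add,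
          pvPyRange_shift _ _ hs, List.map_map]
      have hm1 : ((m : Int) + 1).toNat = m + 1 := by omega
      have hhead : PySem.List.slice (c :: rest) (some 0) (some ((m : Int) + 1))
          = (c :: rest).take (m + 1) := by
        rw [PySem.List.slice_toNat _ le_rfl (by omega)]
        simp [hm1]
      rw [hhead]
      set d : List Char := (c :: rest).drop (m + 1) with hd
      have hlend : d.length = (c :: rest).length - (m + 1) := by simp [hd]
      rw [show pvChunks m (c :: rest)
            = ((c :: rest).take (m+1)) :: pvChunks m d from by rw [pvChunks, ← hd]]
      congr 1
      by_cases hdn : d = []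
      · have hlen1 : (c :: rest).length ≤ m + 1 := by
          have h0 : d.length = 0 := by rw [hdn]; rfl
          rw [hlend] at h0
          omega
        rw [PySem.List.pyRange_of_pos _ _ hs, if_neg (by omega)]
        rw [hdn]
        simp [pvChunks]
      · have hlen2 : (((c :: rest).length : ℕ) : Int) - ((m : Int) + 1) = ((d.length : ℕ) : Int) := by
          have : m + 1 < (c :: rest).length := by
            by_contra hcon
            exact hdn (hd ▸ List.drop_eq_nil_of_le (by omega))
          rw [hlend]
          omega
        rw [hlen2]
        have hcong : ∀ i ∈ PySem.List.pyRange 0 ((d.length : ℕ) : Int) ((m : Int) + 1),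
            ((fun i => PySem.List.slice (c :: rest) (some i) (some (i + ((m : Int) + 1)))) ∘
              (fun x => x + ((m : Int) + 1))) i
              = PySem.List.slice d (some i) (some (i + ((m : Int) + 1))) := by
          intro i hi
          have h0i : 0 ≤ i := ((PySem.List.mem_pyRange_iff_of_pos hs i).mp hi).1
          simp only [Function.comp_apply]
          rw [PySem.List.slice_toNat _ (by omega) (by omega),
              PySem.List.slice_toNat _ (by omega) (by omega)]
          rw [hd, List.drop_drop]
          congr 1
          · omega
          · congr 1
            omega
        rw [List.map_congr_left hcong]
        exact ih d (by rw [hlend]; simp at h ⊢; omega)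
lemma pvMain (text : String) (max_chunk : Int) (hpre : 1 ≤ max_chunk) :
    wrap_long_words_py text max_chunk = wrap_long_words_py_alt text max_chunk := by
  obtain ⟨m, hm⟩ : ∃ m : ℕ, max_chunk = (m : Int) + 1 := ⟨(max_chunk - 1).toNat, by omega⟩
  subst hm
  unfold wrap_long_words_py wrap_long_words_py_alt
  by_cases ht : text = ""
  · simp [ht]
  · rw [if_neg ht, if_neg ht]
    set cs : List Char := text.toList with hcs
    have hpieces : (PySem.Str.split? text " ").getD []
        = (pvSpW cs).map String.ofList := by
      have h1 : PySem.Chars.split? cs [' '] = some (pvSpW cs) := by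
        rw [PySem.Chars.split?]
        simp [pvSplitOn_eq]
      have h2 : PySem.Str.split? text " " = some ((pvSpW cs).map String.ofList) := by
        rw [PySem.Str.split?]
        have hsep : (" " : String).toList = [' '] := by decide
        rw [hsep, ← hcs, h1]
        rfl
      rw [h2]
      rfl
    rw [hpieces]
    have hfun : (fun (ws : List String) (w : String) =>
        if PySem.Str.len w ≤ (m : Int) + 1 then ws ++ [w]
        else ws ++ ((PySem.List.pyRange 0 (PySem.Str.len w) ((m : Int) + 1)).map
                      (fun i => PySem.Str.slice w (some i) (some (i + ((m : Int) + 1))))))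
        = (fun ws w => ws ++ (if PySem.Str.len w ≤ (m : Int) + 1 then [w]
            else (PySem.List.pyRange 0 (PySem.Str.len w) ((m : Int) + 1)).map
                  (fun i => PySem.Str.slice w (some i) (some (i + ((m : Int) + 1)))))) := by
      funext ws w
      split <;> rfl
    rw [hfun]
    simp only [PySem.List.foldl_append_eq_flatMap]
    apply (fun h => by have := congrArg String.ofList h; simpa using this :
      (PySem.Str.join " " _).toList = (String.ofList _).toList → _)
    rw [PySem.Str.toList_join, String.toList_ofList]
    rw [List.map_flatMap, List.flatMap_map]
    obtain ⟨r, hr⟩ := pvFold_words m (pvSpW cs) (pvSpW_ne_nil cs) (pvSpW_nospace cs) []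
    rw [pvJoin_spW] at hr
    rw [hr]
    simp only [String.toList_ofList, List.nil_append]
    refine congrArg (PySem.Chars.join [' ']) ?_
    refine congrArg (fun F => List.flatMap F (pvSpW cs)) ?_
    funext a
    show _ = pvGL m a
    unfold pvGL
    have hla : (String.ofList a).length = a.length := by simp
    rw [hla]
    by_cases hc : ((a.length : ℕ) : Int) ≤ (m : Int) + 1
    · rw [if_pos hc, if_pos hc]
      simp
    · rw [if_neg hc, if_neg hc, List.map_map]
      rw [← pvPyRange_chunks m a.length a le_rfl]
      apply List.map_congr_left
      intro i _
      simp only [Function.comp_apply]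
      rw [PySem.Str.toList_slice, String.toList_ofList]
      rfl

-- ===== VERDICT (by name: the statement is the Claim_ definition above) =====
theorem wrap_long_words_py_spec : Claim_equal_wrap_long_words_py := by
  intro text max_chunk _ hpre
  unfold Spec_wrap_long_words_py
  exact pvMain text max_chunk hpre
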